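-- pv_equiv track=rewrite | github.com/Eya-Benhouria/PyExercisesGUI | EX3TP6.py | sum_facteurs
-- ===== SOURCE A (Python) =====
-- def sum_entier(_entier):
--     sum = 0
--     _entier = int(_entier)
--     while(_entier >= 1):
--         sum += _entier%10
--         _entier = _entier//10
--     return sum
--
-- def sum_facteurs(_list):
--     sum = 0
--     for i in range(0, len(_list)):
--         if(_list[i]<10):
--             sum += int(_list[i])
--         else:
--             sum += sum_entier(_list[i])
--     return sum
-- ===== SOURCE B (Python) =====
-- def sum_facteurs(_list):
--     total = 0
--     for x in _list:
--         if x < 10: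
--             total += int(x)
--         else:
--             # digit-sum(n) = n - 9 * sum_{k>=1} n // 10**k  (no digit extraction)
--             n = int(x)
--             s = n
--             p = 10
--             while p <= n:
--                 s -= 9 * (n // p)
--                 p *= 10
--             total += s
--     return total
-- ===== Notes on version B (the rewrite author's own statement) =====
-- stated objective: alternative
-- what changed: B replaces the %10///10 digit-extraction loop with the closed identity digitsum(n) = n - 9*sum(n//10**k for k>=1), accumulating floor quotients over growing powers of ten instead of extracting digits, and folds over the list elements directly instead of indexing by range(len).
import Mathlib
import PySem

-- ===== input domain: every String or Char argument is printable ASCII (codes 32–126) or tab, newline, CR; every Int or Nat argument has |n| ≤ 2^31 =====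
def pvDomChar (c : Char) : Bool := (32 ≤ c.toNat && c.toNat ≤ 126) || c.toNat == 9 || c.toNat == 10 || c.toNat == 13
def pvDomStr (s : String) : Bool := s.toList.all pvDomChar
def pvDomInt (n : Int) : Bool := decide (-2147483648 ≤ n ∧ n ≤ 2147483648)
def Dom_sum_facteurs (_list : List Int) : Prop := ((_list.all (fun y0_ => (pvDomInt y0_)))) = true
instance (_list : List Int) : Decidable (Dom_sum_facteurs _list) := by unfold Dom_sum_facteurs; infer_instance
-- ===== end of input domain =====

-- B replaces A's %10-and-//10 digit-extraction loop by the floor-quotient identity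
-- digitsum(n) = n - 9 * Σ_{k≥1} n // 10^k and folds over the list directly; same cost ("alternative").

-- ===== PORT A =====
-- termination measures for the two while-loops (named, with small proof terms)
theorem pvMeasureA (e : Int) (h : 1 ≤ e) : (PySem.Int.floordiv e 10).toNat < e.toNat := by
  rw [PySem.Int.floordiv_eq_ediv_of_pos (by decide)]
  have h0 : (0 : Int) < e := h
  have h1 : e / 10 < e := by
    rw [Int.ediv_lt_iff_lt_mul (by decide)]
    calc e = e * 1 := (mul_one e).symm
    _ < e * 10 := mul_lt_mul_of_pos_left (by decide) h0
  exact (Int.toNat_lt_toNat h0).mpr h1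

theorem pvMeasureB (n p : Int) (hp : 1 ≤ p) (h : p ≤ n) :
    (n + 1 - 10 * p).toNat < (n + 1 - p).toNat := by
  have h0 : (0 : Int) < p := hp
  have h1 : p < 10 * p := by
    calc p = 1 * p := (one_mul p).symm
    _ < 10 * p := mul_lt_mul_of_pos_right (by decide) h0
  have h2 : n + 1 - 10 * p < n + 1 - p := sub_lt_sub_left h1 (n + 1)
  have h3 : 0 < n + 1 - p := by
    rw [sub_pos]
    exact Int.lt_add_one_iff.mpr h
  exact (Int.toNat_lt_toNat h3).mpr h2

-- sum_entier: sum = 0; while e >= 1: sum += e % 10; e = e // 10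
def pySumEntier (e : Int) (acc : Int) : Int :=
  if _h : 1 ≤ e then
    pySumEntier (PySem.Int.floordiv e 10) (acc + PySem.Int.mod e 10)
  else acc
termination_by e.toNat
decreasing_by exact pvMeasureA e _h

-- for i in range(0, len(_list)): if _list[i] < 10: sum += int(_list[i]) else sum += sum_entier(_list[i])
-- (int() on an int is the identity; the index i is always in range, so getD's default is never used)
def sum_facteurs (_list : List Int) : Int :=
  (List.range _list.length).foldl
    (fun acc i =>
      let x := _list.getD i 0
      if x < 10 then acc + x else acc + pySumEntier x 0) 0

-- ===== PORT B =====
-- s = n; p = 10; while p <= n: s -= 9 * (n // p); p *= 10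
-- (the '1 ≤ p' test is a totality guard only: B always starts at p = 10 and multiplies by 10)
def altDigitLoop (n : Int) (p : Int) (s : Int) : Int :=
  if hp : 1 ≤ p then
    if h : p ≤ n then
      altDigitLoop n (10 * p) (s - 9 * PySem.Int.floordiv n p)
    else s
  else s
termination_by (n + 1 - p).toNat
decreasing_by exact pvMeasureB n p hp h

def sum_facteurs_alt (_list : List Int) : Int :=
  _list.foldl (fun total x => if x < 10 then total + x else total + altDigitLoop x 10 x) 0

-- ===== PRECONDITION & SPEC =====
def Spec_sum_facteurs (_list : List Int) (out : Int) : Prop := out = sum_facteurs_alt _list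
instance (_list : List Int) (out : Int) : Decidable (Spec_sum_facteurs _list out) := by unfold Spec_sum_facteurs; infer_instance

-- ===== CLAIM (what is proved, stated in full; the proofs are below) =====
def Claim_equal_sum_facteurs : Prop := ∀ (_list : List Int), Dom_sum_facteurs _list → Spec_sum_facteurs _list (sum_facteurs _list)

-- ===== LEMMAS AND PROOFS =====

theorem ediv10_lt (e : Int) (h : 1 ≤ e) : e / 10 < e := by
  rw [Int.ediv_lt_iff_lt_mul (by norm_num)]; omega

theorem pySumEntier_step (e acc : Int) (h : 1 ≤ e) :
    pySumEntier e acc = pySumEntier (PySem.Int.floordiv e 10) (acc + PySem.Int.mod e 10) := by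
  rw [pySumEntier]; simp [h]

theorem pySumEntier_stop (e acc : Int) (h : ¬ 1 ≤ e) : pySumEntier e acc = acc := by
  rw [pySumEntier]; simp [h]

theorem altDigitLoop_step (n p s : Int) (hp : 1 ≤ p) (h : p ≤ n) :
    altDigitLoop n p s = altDigitLoop n (10 * p) (s - 9 * PySem.Int.floordiv n p) := by
  rw [altDigitLoop]; simp [hp, h]

theorem altDigitLoop_stop (n p s : Int) (h : ¬ p ≤ n) : altDigitLoop n p s = s := by
  rw [altDigitLoop]
  by_cases h1 : 1 ≤ p <;> simp [h1, h]

theorem altDigitLoop_stop' (n p s : Int) (h : ¬ 1 ≤ p) : altDigitLoop n p s = s := by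
  rw [altDigitLoop]; simp [h]

-- accumulator lemma for A's helper
theorem pySumEntier_acc (e acc : Int) : pySumEntier e acc = acc + pySumEntier e 0 := by
  by_cases h : 1 ≤ e
  · rw [pySumEntier_step e acc h, pySumEntier_step e 0 h,
        pySumEntier_acc (PySem.Int.floordiv e 10) (acc + PySem.Int.mod e 10),
        pySumEntier_acc (PySem.Int.floordiv e 10) (0 + PySem.Int.mod e 10)]
    ring
  · rw [pySumEntier_stop e acc h, pySumEntier_stop e 0 h]; ring
termination_by e.toNat
decreasing_by all_goals exact pvMeasureA e h

-- accumulator lemma for B's helper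
theorem altDigitLoop_acc (n p s : Int) : altDigitLoop n p s = s + altDigitLoop n p 0 := by
  by_cases hp : 1 ≤ p
  · by_cases h : p ≤ n
    · rw [altDigitLoop_step n p s hp h, altDigitLoop_step n p 0 hp h,
          altDigitLoop_acc n (10 * p) (s - 9 * PySem.Int.floordiv n p),
          altDigitLoop_acc n (10 * p) (0 - 9 * PySem.Int.floordiv n p)]
      ring
    · rw [altDigitLoop_stop n p s h, altDigitLoop_stop n p 0 h]; ring
  · rw [altDigitLoop_stop' n p s hp, altDigitLoop_stop' n p 0 hp]; ring
termination_by (n + 1 - p).toNat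
decreasing_by all_goals omega

-- power-of-ten shift: one division by 10 moves the whole quotient sum down one level
theorem altDigitLoop_shift (n p : Int) (hp : 1 ≤ p) (hn : 0 ≤ n) :
    altDigitLoop n (10 * p) 0 = altDigitLoop (n / 10) p 0 := by
  have hdvd : PySem.Int.floordiv n (10 * p) = PySem.Int.floordiv (n / 10) p := by
    rw [PySem.Int.floordiv_eq_ediv_of_pos (by omega),
        PySem.Int.floordiv_eq_ediv_of_pos (by omega),
        ← Int.ediv_ediv_of_nonneg (by norm_num : (0:Int) ≤ 10)]
  by_cases h : 10 * p ≤ n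
  · have hpn : p ≤ n / 10 := by
      rw [Int.le_ediv_iff_mul_le (by norm_num)]; omega
    rw [altDigitLoop_step n (10 * p) 0 (by omega) h,
        altDigitLoop_step (n / 10) p 0 hp hpn,
        altDigitLoop_acc n (10 * (10 * p)), altDigitLoop_acc (n / 10) (10 * p),
        altDigitLoop_shift n (10 * p) (by omega) hn, hdvd]
  · have hpn : ¬ p ≤ n / 10 := by
      rw [Int.le_ediv_iff_mul_le (by norm_num)]; omega
    rw [altDigitLoop_stop n (10 * p) 0 h, altDigitLoop_stop (n / 10) p 0 hpn]
termination_by (n + 1 - p).toNat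
decreasing_by all_goals omega

-- the two digit-sum computations agree on every nonnegative n
theorem digitSum_eq (n : Int) (hn : 0 ≤ n) : pySumEntier n 0 = altDigitLoop n 10 n := by
  by_cases h10 : 10 ≤ n
  · have hm0 : 0 ≤ n / 10 := Int.ediv_nonneg hn (by norm_num)
    have ih : pySumEntier (n / 10) 0 = altDigitLoop (n / 10) 10 (n / 10) :=
      digitSum_eq (n / 10) hm0
    rw [pySumEntier_step n 0 (by omega), pySumEntier_acc,
        PySem.Int.floordiv_eq_ediv_of_pos (by norm_num),
        PySem.Int.mod_eq_emod_of_pos (by norm_num)]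
    rw [altDigitLoop_step n 10 n (by norm_num) h10, altDigitLoop_acc,
        altDigitLoop_shift n 10 (by norm_num) hn,
        PySem.Int.floordiv_eq_ediv_of_pos (by norm_num)]
    rw [altDigitLoop_acc (n / 10) 10 (n / 10)] at ih
    have hmod : n % 10 = n - 10 * (n / 10) := by omega
    omega
  · rw [altDigitLoop_stop n 10 n h10]
    by_cases h1 : 1 ≤ n
    · have hd : PySem.Int.floordiv n 10 = 0 := by
        rw [PySem.Int.floordiv_eq_ediv_of_pos (by norm_num)]; omega
      have hm : PySem.Int.mod n 10 = n := by
        rw [PySem.Int.mod_eq_emod_of_pos (by norm_num)]; omega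
      rw [pySumEntier_step n 0 h1, hd, hm, pySumEntier_stop 0 (0 + n) (by norm_num)]
      ring
    · rw [pySumEntier_stop n 0 h1]; omega
termination_by n.toNat
decreasing_by
  have h1 : n / 10 < n := ediv10_lt n (by omega)

  omega

-- the bodies of the two list loops agree on every element
theorem body_eq (x a : Int) :
    (if x < 10 then a + x else a + pySumEntier x 0)
      = (if x < 10 then a + x else a + altDigitLoop x 10 x) := by
  by_cases h : x < 10
  · simp [h]
  · simp only [h, if_false]
    rw [digitSum_eq x (by omega)]

-- index fold over range(len) = direct fold over the list
theorem range_fold_eq (l : List Int) (acc : Int) :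
    (List.range l.length).foldl
      (fun a i => let x := l.getD i 0
                  if x < 10 then a + x else a + pySumEntier x 0) acc
      = l.foldl (fun a x => if x < 10 then a + x else a + pySumEntier x 0) acc := by
  induction l generalizing acc with
  | nil => simp
  | cons y ys ih =>
    simp only [List.length_cons, List.range_succ_eq_map, List.foldl_cons, List.foldl_map]
    simpa using ih (if y < 10 then acc + y else acc + pySumEntier y 0)

-- ===== VERDICT (by name: the statement is the Claim_ definition above) =====
theorem sum_facteurs_spec : Claim_equal_sum_facteurs := by
  intro l _
  show sum_facteurs l = sum_facteurs_alt l
  unfold sum_facteurs sum_facteurs_alt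
  rw [range_fold_eq]
  congr 1
  funext a x
  exact body_eq x a
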